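-- pv_equiv track=rewrite | github.com/bastior/AdventOfcode2018 | Day2/Challenge1.py | Run
-- ===== SOURCE A (Python) =====
-- def Run(arg):
--     twos = 0
--     threes = 0
--     for word in arg:
--         d = {}
--         for latter in word:
--             if latter in d:
--                 d[latter] += 1
--             else:
--                 d[latter] = 1
--         if 2 in d.values():
--             twos += 1
--         if 3 in d.values():
--             threes += 1
--     return twos*threes
-- ===== SOURCE B (Python) =====
-- def _run_lengths(s):
--     # run lengths of the sorted character list s (consecutive equal chars)
--     if not s:
--         return []
--     k = 1
--     while k < len(s) and s[k] == s[0]: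
--         k += 1
--     return [k] + _run_lengths(s[k:])
--
-- def Run(arg):
--     # sort each word and scan runs of equal characters instead of hashing counts
--     twos = 0
--     threes = 0
--     for word in arg:
--         runs = _run_lengths(sorted(word))
--         if 2 in runs:
--             twos += 1
--         if 3 in runs:
--             threes += 1
--     return twos * threes
-- ===== Notes on version B (the rewrite author's own statement) =====
-- stated objective: alternative
-- what changed: Replaces the per-word hash-based frequency dict with sort-then-scan: each word's characters are sorted and the run lengths of consecutive equal characters are collected; a word counts for twos/threes iff 2/3 is among its run lengths.
import Mathlib
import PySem

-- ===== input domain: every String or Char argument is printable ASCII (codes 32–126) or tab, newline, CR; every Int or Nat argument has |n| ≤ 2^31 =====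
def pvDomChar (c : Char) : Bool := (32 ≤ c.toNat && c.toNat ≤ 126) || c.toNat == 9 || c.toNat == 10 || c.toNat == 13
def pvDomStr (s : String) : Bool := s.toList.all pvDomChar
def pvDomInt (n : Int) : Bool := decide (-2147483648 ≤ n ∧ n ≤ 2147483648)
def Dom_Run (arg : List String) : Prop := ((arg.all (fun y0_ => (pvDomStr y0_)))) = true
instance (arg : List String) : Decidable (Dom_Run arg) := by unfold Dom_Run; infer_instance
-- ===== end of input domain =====

-- B replaces A's per-word frequency dict with sort-then-scan over runs of equal characters; same value, different data representation (not faster).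

-- ===== PORT A =====
-- the inner 'for latter in word' loop building d
def pvDictA (w : List Char) : PySem.Dict Char Int :=
  w.foldl (fun d c => if d.contains c then d.insert c (d.getD c 0 + 1) else d.insert c 1)
    PySem.Dict.empty

def Run (arg : List String) : Int :=
  let p := arg.foldl (fun s word =>
    let d := pvDictA word.toList
    ((if (2 : Int) ∈ d.values then s.1 + 1 else s.1),
     (if (3 : Int) ∈ d.values then s.2 + 1 else s.2))) ((0 : Int), (0 : Int))
  p.1 * p.2

-- ===== PORT B =====
-- _run_lengths: the inner 'while' counts the leading run (takeWhile), then recurses on the rest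
def pvRunLens (s : List Char) : List Int :=
  match s with
  | [] => []
  | c :: rest =>
    ((1 + (rest.takeWhile (· == c)).length : Nat) : Int)
      :: pvRunLens (rest.dropWhile (· == c))
termination_by s.length
decreasing_by
  simp only [List.length_cons]
  exact Nat.lt_succ_of_le (List.Sublist.length_le (List.dropWhile_sublist _))

def Run_alt (arg : List String) : Int :=
  let p := arg.foldl (fun s word =>
    let runs := pvRunLens (PySem.List.sorted word.toList (fun x => x) false)
    ((if (2 : Int) ∈ runs then s.1 + 1 else s.1),
     (if (3 : Int) ∈ runs then s.2 + 1 else s.2))) ((0 : Int), (0 : Int))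
  p.1 * p.2

-- ===== PRECONDITION & SPEC =====
def Spec_Run (arg : List String) (out : Int) : Prop := out = Run_alt arg
instance (arg : List String) (out : Int) : Decidable (Spec_Run arg out) := by unfold Spec_Run; infer_instance

-- ===== CLAIM (what is proved, stated in full; the proofs are below) =====
def Claim_equal_Run : Prop := ∀ (arg : List String), Dom_Run arg → Spec_Run arg (Run arg)

-- ===== LEMMAS AND PROOFS =====

-- A's hand-built frequency dict is Counter(word)
theorem pvDictA_eq_counter (w : List Char) : pvDictA w = PySem.Dict.counter w := by
  unfold pvDictA
  rw [PySem.List.foldl_congr_mem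
      (g := fun d c => PySem.Dict.insert d c (PySem.Dict.getD d c 0 + 1))]
  · exact PySem.Dict.foldl_insert_getD_add_one_eq_counter w
  · intro d c _
    by_cases h : d.contains c = true
    · simp [h]
    · rw [if_neg (by simp [h]), PySem.Dict.getD_of_not_contains d 0 (by simpa using h)]
      norm_num

-- n occurs among A's dict values iff some character of w occurs exactly n times
theorem mem_values_counter (w : List Char) (n : Int) :
    n ∈ (PySem.Dict.counter w).values ↔ ∃ c, c ∈ w ∧ (w.count c : Int) = n := by
  have : (PySem.Dict.counter w).values
      = (PySem.Set.ofList w).map (fun k => ((w.count k : Int))) := by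
    show ((PySem.Dict.counter w).items.map (·.2))
        = (PySem.Set.ofList w).map (fun k => ((w.count k : Int)))
    rw [PySem.Dict.items_counter]
    simp
  rw [this]
  simp only [List.mem_map, PySem.Set.mem_ofList]

-- run lengths of a sorted list are exactly the multiplicities of its elements
theorem pvRunLens_mem (l : List Char) (hl : l.Pairwise (· ≤ ·)) (n : Int) :
    n ∈ pvRunLens l ↔ ∃ c, c ∈ l ∧ (l.count c : Int) = n := by
  induction l using pvRunLens.induct with
  | case1 => simp [pvRunLens]
  | case2 c rest ih =>
    have hsplit : rest = rest.takeWhile (· == c) ++ rest.dropWhile (· == c) :=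
      (List.takeWhile_append_dropWhile).symm
    have heq : ∀ x ∈ rest.takeWhile (· == c), x = c := by
      intro x hx
      have := List.mem_takeWhile_imp hx
      simpa using this
    -- sortedness of the tail pieces
    have hrest : rest.Pairwise (· ≤ ·) := (List.pairwise_cons.mp hl).2
    have hrest' : (rest.dropWhile (· == c)).Pairwise (· ≤ ·) :=
      hrest.sublist (List.dropWhile_sublist _)
    -- c does not occur in the dropped suffix
    have hcnot : c ∉ rest.dropWhile (· == c) := by
      intro hc
      match hd : rest.dropWhile (· == c) with
      | [] => rw [hd] at hc; exact absurd hc (List.not_mem_nil)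
      | h :: t =>
        have hhd : ¬ (h == c) = true := by
          have := List.head?_dropWhile_not (p := (· == c)) (l := rest)
          rw [hd] at this; simpa using this
        have hne : h ≠ c := by simpa using hhd
        -- h ≤ every element of the suffix; c ≤ h from sortedness of rest
        have hch : c ≤ h := by
          have hmem : h ∈ rest := (List.dropWhile_sublist _).mem (by rw [hd]; exact List.mem_cons_self)
          exact (List.pairwise_cons.mp hl).1 h hmem
        rw [hd] at hc
        rcases List.mem_cons.mp hc with rfl | hct
        · exact hne rfl
        · rw [hd] at hrest'
          have : h ≤ c := (List.pairwise_cons.mp hrest').1 c hct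
          exact hne (le_antisymm this hch)
    -- counts in the full list
    have hcount_c : ((c :: rest).count c : Int)
        = ((1 + (rest.takeWhile (· == c)).length : Nat) : Int) := by
      have h1 : rest.count c = (rest.takeWhile (· == c)).length := by
        conv_lhs => rw [hsplit]
        rw [List.count_append, List.count_eq_zero.mpr hcnot, Nat.add_zero]
        exact List.count_eq_length.mpr (fun x hx => by simpa using (heq x hx).symm)
      simp [List.count_cons_self, h1, Nat.add_comm]
    have hcount_ne : ∀ d, d ≠ c →
        (c :: rest).count d = (rest.dropWhile (· == c)).count d := by
      intro d hd
      rw [List.count_cons_of_ne hd.symm]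
      conv_lhs => rw [hsplit]
      rw [List.count_append, List.count_eq_zero.mpr (fun hmem => hd (heq d hmem)), Nat.zero_add]
    rw [pvRunLens]
    simp only [List.mem_cons, ih hrest']
    constructor
    · rintro (rfl | ⟨d, hdm, hdc⟩)
      · exact ⟨c, Or.inl rfl, hcount_c⟩
      · have hdne : d ≠ c := fun h => hcnot (h ▸ hdm)
        refine ⟨d, Or.inr ((List.dropWhile_sublist _).mem hdm), ?_⟩
        rw [hcount_ne d hdne]; exact hdc
    · rintro ⟨d, hdm, hdc⟩
      by_cases hdne : d = c
      · subst hdne; left; rw [← hdc, hcount_c]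
      · right
        rcases hdm with rfl | hdr
        · exact absurd rfl hdne
        rcases List.mem_append.mp (hsplit ▸ hdr) with htk | hdw
        · exact absurd (heq d htk) hdne
        · exact ⟨d, hdw, by rw [← hcount_ne d hdne]; exact hdc⟩

-- per-word agreement of the two membership tests
theorem word_iff (w : String) (n : Int) :
    ((n : Int) ∈ (pvDictA w.toList).values)
      ↔ (n ∈ pvRunLens (PySem.List.sorted w.toList (fun x => x) false)) := by
  rw [pvDictA_eq_counter, mem_values_counter,
    pvRunLens_mem _ (by simpa using PySem.List.sorted_pairwise w.toList (fun x => x))]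
  have hperm : (PySem.List.sorted w.toList (fun x => x) false).Perm w.toList :=
    PySem.List.sorted_perm _ _ _
  constructor
  · rintro ⟨c, hc, h⟩
    exact ⟨c, hperm.mem_iff.mpr hc, by rw [hperm.count_eq]; exact h⟩
  · rintro ⟨c, hc, h⟩
    exact ⟨c, hperm.mem_iff.mp hc, by rw [← hperm.count_eq]; exact h⟩

-- ===== VERDICT (by name: the statement is the Claim_ definition above) =====
theorem Run_spec : Claim_equal_Run := by
  intro arg _
  show Run arg = Run_alt arg
  unfold Run Run_alt
  show (arg.foldl (fun s word =>
      ((if (2 : Int) ∈ (pvDictA word.toList).values then s.1 + 1 else s.1),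
       (if (3 : Int) ∈ (pvDictA word.toList).values then s.2 + 1 else s.2))) ((0 : Int), (0 : Int))).1 *
    (arg.foldl (fun s word =>
      ((if (2 : Int) ∈ (pvDictA word.toList).values then s.1 + 1 else s.1),
       (if (3 : Int) ∈ (pvDictA word.toList).values then s.2 + 1 else s.2))) ((0 : Int), (0 : Int))).2 = _
  rw [PySem.List.foldl_congr_mem
      (g := fun (s : Int × Int) (word : String) =>
        ((if (2 : Int) ∈ pvRunLens (PySem.List.sorted word.toList (fun x => x) false) then s.1 + 1 else s.1),
         (if (3 : Int) ∈ pvRunLens (PySem.List.sorted word.toList (fun x => x) false) then s.2 + 1 else s.2)))]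
  intro s word _
  rw [if_congr (word_iff word 2) rfl rfl, if_congr (word_iff word 3) rfl rfl]
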